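-- pv_equiv track=rewrite | github.com/fernandaborgesdasilva/evolutionary_ensemble | exec/parallel_brute_force_random_search_exec.py | estimators_pool
-- ===== SOURCE A (Python) =====
-- from itertools import product, combinations
--
-- def estimators_pool(estimator_grid):
--     for estimator, param_grid in estimator_grid.items():
--         items = sorted(param_grid.items())
--         if not items:
--             yield (estimator, {})
--         else:
--             keys, values = zip(*items)
--             for v in product(*values):
--                 params = dict(zip(keys, v))
--                 yield (estimator, params)
-- ===== SOURCE B (Python) =====
-- def estimators_pool(estimator_grid):
--     for estimator, param_grid in estimator_grid.items():
--         result = [{}]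
--         for key, vals in sorted(param_grid.items()):
--             result = [{**d, key: v} for d in result for v in vals]
--         for d in result:
--             yield (estimator, d)
-- ===== Notes on version B (the rewrite author's own statement) =====
-- stated objective: simpler
-- what changed: Replaces itertools.product plus the zip/unzip/dict(zip(...)) reassembly and the explicit empty-grid branch with a single incremental fold: result starts as [{}] and each sorted (key, vals) pair extends every partial dict, which handles the empty grid with no special case.
import Mathlib
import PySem

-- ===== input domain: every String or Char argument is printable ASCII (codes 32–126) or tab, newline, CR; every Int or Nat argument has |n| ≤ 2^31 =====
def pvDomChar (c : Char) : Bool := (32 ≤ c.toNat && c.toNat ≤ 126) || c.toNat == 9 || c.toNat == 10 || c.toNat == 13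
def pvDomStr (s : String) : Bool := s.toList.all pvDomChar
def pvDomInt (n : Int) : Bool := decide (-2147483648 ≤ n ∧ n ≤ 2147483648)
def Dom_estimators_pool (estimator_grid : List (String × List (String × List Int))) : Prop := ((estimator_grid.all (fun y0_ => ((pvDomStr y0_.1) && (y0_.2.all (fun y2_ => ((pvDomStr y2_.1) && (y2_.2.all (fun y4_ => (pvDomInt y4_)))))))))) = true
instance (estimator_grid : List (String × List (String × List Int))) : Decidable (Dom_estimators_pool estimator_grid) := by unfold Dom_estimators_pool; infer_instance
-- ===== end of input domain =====

-- ===== PORT A =====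
-- B changes: one incremental fold over the sorted param grid replaces itertools.product,
-- zip/unzip reassembly and the empty-grid branch (objective: simpler).
-- Note: dict inputs have distinct keys, so sorted(param_grid.items()) is ported as a stable
-- sort by key, dict(zip(keys, v)) as the plain pair list keys.zip v, and {**d, key: v} as
-- d ++ [(key, v)] — each exact on dict inputs (distinct keys).

-- itertools.product(*values), last coordinate varying fastest
def pvProd : List (List Int) → List (List Int)
  | [] => [[]]
  | vs :: rest => vs.flatMap (fun a => (pvProd rest).map (fun t => a :: t))

def estimators_pool (estimator_grid : List (String × List (String × List Int))) : List (String × (List (String × Int))) :=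
  estimator_grid.flatMap (fun ep =>
    let items := PySem.List.sorted ep.2 (fun p => p.1) false
    match items with
    | [] => [(ep.1, [])]
    | _ :: _ =>
      let keys := items.map Prod.fst
      let values := items.map Prod.snd
      (pvProd values).map (fun v => (ep.1, keys.zip v)))

-- ===== PORT B =====
def estimators_pool_alt (estimator_grid : List (String × List (String × List Int))) : List (String × (List (String × Int))) :=
  estimator_grid.flatMap (fun ep =>
    let result := (PySem.List.sorted ep.2 (fun p => p.1) false).foldl
      (fun acc kv => acc.flatMap (fun d => kv.2.map (fun v => d ++ [(kv.1, v)]))) [[]]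
    result.map (fun d => (ep.1, d)))

-- ===== PRECONDITION & SPEC =====
def Spec_estimators_pool (estimator_grid : List (String × List (String × List Int))) (out : List (String × (List (String × Int)))) : Prop := out = estimators_pool_alt estimator_grid
instance (estimator_grid : List (String × List (String × List Int))) (out : List (String × (List (String × Int)))) : Decidable (Spec_estimators_pool estimator_grid out) := by unfold Spec_estimators_pool; infer_instance

-- ===== CLAIM (what is proved, stated in full; the proofs are below) =====
def Claim_equal_estimators_pool : Prop := ∀ (estimator_grid : List (String × List (String × List Int))), Dom_estimators_pool estimator_grid → Spec_estimators_pool estimator_grid (estimators_pool estimator_grid)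

-- ===== LEMMAS AND PROOFS =====
-- The fold over items, started from any accumulator, appends every combination of the
-- remaining items to every accumulated partial dict.
lemma foldl_combos (items : List (String × List Int)) :
    ∀ (acc : List (List (String × Int))),
      items.foldl (fun acc kv => acc.flatMap (fun d => kv.2.map (fun v => d ++ [(kv.1, v)]))) acc
        = acc.flatMap (fun d =>
            (pvProd (items.map Prod.snd)).map (fun v => d ++ (items.map Prod.fst).zip v)) := by
  induction items with
  | nil => intro acc; simp [pvProd]
  | cons kv rest ih =>
    intro acc
    simp only [List.foldl_cons, ih, pvProd, List.map_cons]
    simp [List.flatMap_assoc, List.map_flatMap, List.flatMap_map, Function.comp_def,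
      List.zip_cons_cons, List.append_assoc]

-- ===== VERDICT (by name: the statement is the Claim_ definition above) =====
theorem estimators_pool_spec : Claim_equal_estimators_pool := by
  intro grid _
  unfold Spec_estimators_pool estimators_pool estimators_pool_alt
  refine congrArg (fun f => List.flatMap f grid) (funext fun ep => ?_)
  cases h : PySem.List.sorted ep.2 (fun p => p.1) false with
  | nil => simp
  | cons a l =>
    simp only [foldl_combos]
    simp
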